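-- pv_equiv track=rewrite | github.com/MrBrantCode/unitest_baseline | mut_generate/mist_train_cf/cf_58836/solution.py | message_ordering
-- ===== SOURCE A (Python) =====
-- def message_ordering(messages):
--     """
--     Simulates how idempotent producer feature in Kafka maintains message order.
--
--     Args:
--         messages (list): A list of tuples containing message details (PID, sequence number, status).
--
--     Returns:
--         list: Messages in the order they should be written to the log.
--     """
--
--     # Initialize an empty log and a dictionary to keep track of sequence numbers for each PID
--     log = []
--     sequence_numbers = {}
--
--     # Iterate over each message
--     for message in messages:
--         pid, sequence_number, _ = message
--
--         # If the PID is not in the dictionary, add it with the current sequence number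
--         if pid not in sequence_numbers:
--             sequence_numbers[pid] = sequence_number
--         # If the sequence number is not consecutive, wait for the previous message to be committed
--         elif sequence_numbers[pid] + 1 != sequence_number:
--             continue
--         # Commit the message to the log and update the sequence number for the PID
--         log.append(message)
--         sequence_numbers[pid] = sequence_number
--
--     return log
-- ===== SOURCE B (Python) =====
-- def message_ordering(messages):
--     """
--     Simulates how idempotent producer feature in Kafka maintains message order.
--
--     Two-phase re-implementation: group messages (with their original indices)
--     per PID, run the consecutive-sequence acceptance filter on each PID's
--     stream independently, then merge the accepted entries back into the
--     original global order by sorting their indices.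
--     """
--     groups = {}
--     for i, message in enumerate(messages):
--         pid, sequence_number, _ = message
--         groups.setdefault(pid, []).append((i, message))
--
--     accepted = []
--     for entries in groups.values():
--         last = None
--         for i, message in entries:
--             _, sequence_number, _ = message
--             if last is None or last + 1 == sequence_number:
--                 accepted.append((i, message))
--                 last = sequence_number
--
--     accepted.sort(key=lambda t: t[0])
--     return [message for _, message in accepted]
-- ===== Notes on version B (the rewrite author's own statement) =====
-- stated objective: alternative
-- what changed: Replaces A's single interleaved pass with a mutable last-seq dict by a two-phase algorithm: group messages with their original indices per PID, run the acceptance filter on each PID's stream independently, then restore the global order by sorting the accepted indices.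
import Mathlib
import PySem

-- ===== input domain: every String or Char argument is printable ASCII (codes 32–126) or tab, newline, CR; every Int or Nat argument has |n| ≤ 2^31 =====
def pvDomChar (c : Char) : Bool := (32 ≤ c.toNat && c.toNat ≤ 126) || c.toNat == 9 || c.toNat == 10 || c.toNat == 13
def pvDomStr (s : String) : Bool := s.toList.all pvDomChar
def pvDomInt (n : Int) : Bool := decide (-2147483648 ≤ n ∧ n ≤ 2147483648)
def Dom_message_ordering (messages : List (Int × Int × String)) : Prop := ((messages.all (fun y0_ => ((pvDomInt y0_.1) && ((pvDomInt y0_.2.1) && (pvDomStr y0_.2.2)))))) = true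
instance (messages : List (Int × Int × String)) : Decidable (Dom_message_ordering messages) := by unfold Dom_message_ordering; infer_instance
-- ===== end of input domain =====

-- B replaces A's single interleaved pass with a two-phase algorithm (group per PID with
-- original indices, filter each PID's stream independently, merge back by sorting indices);
-- objective: alternative decomposition, not faster.

-- ===== PORT A =====
-- one step of A's loop body: state = (log, sequence_numbers)
def stepA (st : List (Int × Int × String) × PySem.Dict Int Int) (m : Int × Int × String) :
    List (Int × Int × String) × PySem.Dict Int Int :=
  let log := st.1
  let seqs := st.2
  if seqs.contains m.1 = false then
    -- `sequence_numbers[pid] = sequence_number`, then fall through to commit (sets it again)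
    let seqs1 := seqs.insert m.1 m.2.1
    (log ++ [m], seqs1.insert m.1 m.2.1)
  else if seqs.getD m.1 0 + 1 ≠ m.2.1 then
    -- `continue`
    (log, seqs)
  else
    (log ++ [m], seqs.insert m.1 m.2.1)

def message_ordering (messages : List (Int × Int × String)) : List (Int × Int × String) :=
  (messages.foldl stepA ([], PySem.Dict.empty)).1

-- ===== PORT B =====
-- per-PID acceptance filter: accept the first entry, then only consecutive sequence numbers
def acceptGroup (last? : Option Int) : List (Int × (Int × Int × String)) → List (Int × (Int × Int × String))
  | [] => []
  | p :: rest =>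
    match last? with
    | none => p :: acceptGroup (some p.2.2.1) rest
    | some last =>
      if last + 1 = p.2.2.1 then p :: acceptGroup (some p.2.2.1) rest
      else acceptGroup (some last) rest

def message_ordering_alt (messages : List (Int × Int × String)) : List (Int × Int × String) :=
  -- phase 1: group (index, message) per PID, insertion order
  let groups := (PySem.List.enumerate messages).foldl
      (fun d p => d.modify p.2.1 [] (· ++ [p])) PySem.Dict.empty
  -- phase 2: filter each PID's stream independently
  let accepted := groups.values.flatMap (fun entries => acceptGroup none entries)
  -- phase 3: restore the global order by the original indices
  (PySem.List.sorted accepted (fun t => t.1) false).map (fun t => t.2)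

-- ===== PRECONDITION & SPEC =====
def Spec_message_ordering (messages : List (Int × Int × String)) (out : List (Int × Int × String)) : Prop := out = message_ordering_alt messages
instance (messages : List (Int × Int × String)) (out : List (Int × Int × String)) : Decidable (Spec_message_ordering messages out) := by unfold Spec_message_ordering; infer_instance

-- ===== CLAIM (what is proved, stated in full; the proofs are below) =====
def Claim_equal_message_ordering : Prop := ∀ (messages : List (Int × Int × String)), Dom_message_ordering messages → Spec_message_ordering messages (message_ordering messages)

-- ===== LEMMAS AND PROOFS =====

-- proof-side reference: A's acceptance decision along the indexed list
def acceptAll (seqs : PySem.Dict Int Int) : List (Int × (Int × Int × String)) → List (Int × (Int × Int × String))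
  | [] => []
  | p :: rest =>
    if seqs.contains p.2.1 = false ∨ seqs.getD p.2.1 0 + 1 = p.2.2.1 then
      p :: acceptAll (seqs.insert p.2.1 p.2.2.1) rest
    else
      acceptAll seqs rest

-- A's fold computes acceptAll (indices are carried along but ignored)
theorem foldA_eq (il : List (Int × (Int × Int × String))) :
    ∀ (log : List (Int × Int × String)) (seqs : PySem.Dict Int Int),
    ((il.map (·.2)).foldl stepA (log, seqs)).1 = log ++ (acceptAll seqs il).map (·.2) := by
  induction il with
  | nil => intro log seqs; simp [acceptAll]
  | cons p t ih =>
    intro log seqs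
    simp only [List.map_cons, List.foldl_cons, acceptAll]
    by_cases hc : seqs.contains p.2.1 = false
    · rw [if_pos (Or.inl hc)]
      simp [stepA, hc, PySem.Dict.insert_insert_self, ih]
    · by_cases hd : seqs.getD p.2.1 0 + 1 = p.2.2.1
      · rw [if_pos (Or.inr hd)]
        simp [stepA, hc, hd, ih]
      · rw [if_neg (by tauto)]
        simp [stepA, hc, hd, ih]

-- acceptAll restricted to one PID is acceptGroup driven by that PID's dict entry
theorem acceptAll_filter (k : Int) (il : List (Int × (Int × Int × String))) :
    ∀ (seqs : PySem.Dict Int Int),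
    (acceptAll seqs il).filter (fun q => q.2.1 == k) =
      acceptGroup (seqs.get? k) (il.filter (fun q => q.2.1 == k)) := by
  induction il with
  | nil => intro seqs; simp [acceptAll, acceptGroup]
  | cons p t ih =>
    intro seqs
    by_cases hc : seqs.contains p.2.1 = false ∨ seqs.getD p.2.1 0 + 1 = p.2.2.1
    · rw [acceptAll, if_pos hc]
      by_cases hk : p.2.1 = k
      · subst hk
        rcases ho : seqs.get? p.2.1 with _ | last
        · have : seqs.contains p.2.1 = false := by
            rw [PySem.Dict.contains_eq_isSome_get?, ho]; rfl
          simp [acceptGroup, ih, PySem.Dict.get?_insert_self]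
        · have hct : seqs.contains p.2.1 = true := by
            rw [PySem.Dict.contains_eq_isSome_get?, ho]; rfl
          have hlast : seqs.getD p.2.1 0 = last := by
            rw [PySem.Dict.getD_eq_get?_getD, ho]; rfl
          have hseq : last + 1 = p.2.2.1 := by
            rcases hc with hc | hc
            · rw [hct] at hc; cases hc
            · omega
          simp [acceptGroup, hseq, ih, PySem.Dict.get?_insert_self]
      · have hne : (p.2.1 == k) = false := by simp [hk]
        have hget : (seqs.insert p.2.1 p.2.2.1).get? k = seqs.get? k :=
          PySem.Dict.get?_insert_of_ne seqs p.2.2.1 (fun h => hk h.symm)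
        simp [hne, ih, hget]
    · push Not at hc
      obtain ⟨hct, hd⟩ := hc
      have hct : seqs.contains p.2.1 = true := by
        cases h : seqs.contains p.2.1 with
        | false => exact absurd h hct
        | true => rfl
      rw [acceptAll, if_neg (by simp [hct, hd])]
      by_cases hk : p.2.1 = k
      · subst hk
        obtain ⟨last, ho⟩ : ∃ last, seqs.get? p.2.1 = some last := by
          rw [PySem.Dict.contains_eq_isSome_get?] at hct
          exact Option.isSome_iff_exists.mp hct
        have hlast : seqs.getD p.2.1 0 = last := by
          rw [PySem.Dict.getD_eq_get?_getD, ho]; rfl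
        have hseq : ¬ (last + 1 = p.2.2.1) := by omega
        simp [acceptGroup, ho, hseq, ih]
      · have hne : (p.2.1 == k) = false := by simp [hk]
        simp [hne, ih]

theorem acceptAll_sublist (il : List (Int × (Int × Int × String))) :
    ∀ (seqs : PySem.Dict Int Int), (acceptAll seqs il).Sublist il := by
  induction il with
  | nil => intro seqs; simp [acceptAll]
  | cons p t ih =>
    intro seqs
    rw [acceptAll]
    split
    · exact (ih _).cons₂ p
    · exact (ih _).cons p

-- partition-by-key blocks concatenate to a permutation of the list
theorem perm_flatMap_filter (ks : List Int) : ks.Nodup →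
    ∀ (il : List (Int × (Int × Int × String))), (∀ q ∈ il, q.2.1 ∈ ks) →
    (ks.flatMap (fun k => il.filter (fun q => q.2.1 == k))).Perm il := by
  induction ks with
  | nil =>
    intro _ il hcov
    have hnil : il = [] := by
      cases il with
      | nil => rfl
      | cons q t => exact absurd (hcov q List.mem_cons_self) (by simp)
    subst hnil
    simp
  | cons k ks ih =>
    intro hnd il hcov
    have hk : k ∉ ks := (List.nodup_cons.mp hnd).1
    have hnd' : ks.Nodup := (List.nodup_cons.mp hnd).2
    rw [List.flatMap_cons]
    have hrest : ks.flatMap (fun k' => il.filter (fun q => q.2.1 == k')) =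
        ks.flatMap (fun k' => (il.filter (fun q => !(q.2.1 == k))).filter (fun q => q.2.1 == k')) := by
      apply List.flatMap_congr
      intro k' hk'
      have hne : k' ≠ k := fun h => hk (h ▸ hk')
      rw [List.filter_filter]
      apply List.filter_congr
      intro q _
      by_cases h : q.2.1 = k'
      · simp [h, hne]
      · simp [h]
    rw [hrest]
    have hperm := ih hnd' (il.filter (fun q => !(q.2.1 == k)))
      (by
        intro q hq
        have hmem := List.mem_of_mem_filter hq
        have hne : (q.2.1 == k) = false := by
          have := List.of_mem_filter hq
          simpa using this
        have := hcov q hmem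
        rcases List.mem_cons.mp this with h | h
        · simp [h] at hne
        · exact h)
    exact (hperm.append_left _).trans (List.filter_append_perm _ il)

-- ===== VERDICT (by name: the statement is the Claim_ definition above) =====
theorem message_ordering_spec : Claim_equal_message_ordering := by
  intro messages _
  unfold Spec_message_ordering
  -- notation
  set il := PySem.List.enumerate messages 0 with hil
  -- A computes acceptAll
  have hA : message_ordering messages = (acceptAll PySem.Dict.empty il).map (·.2) := by
    have hm : il.map (·.2) = messages := PySem.List.map_snd_enumerate messages 0
    calc message_ordering messages
        = ((il.map (·.2)).foldl stepA ([], PySem.Dict.empty)).1 := by rw [hm]; rfl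
      _ = [] ++ (acceptAll PySem.Dict.empty il).map (·.2) := foldA_eq il [] PySem.Dict.empty
      _ = (acceptAll PySem.Dict.empty il).map (·.2) := by simp
  -- the groups dictionary
  set G := (il.foldl (fun d p => d.modify p.2.1 [] (· ++ [p])) PySem.Dict.empty) with hG
  have hnodup : G.keys.Nodup := by
    apply PySem.Dict.nodup_keys_foldl_modify_key
    exact PySem.Dict.nodup_keys_empty
  have hkeys : G.keys = PySem.Set.ofList (il.map (fun p => p.2.1)) := by
    rw [hG, PySem.Dict.keys_foldl_modify_key, PySem.Dict.keys_empty]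
    rfl
  have hgetD : ∀ k, G.getD k [] = il.filter (fun q => q.2.1 == k) := by
    intro k
    have hfold : G = (il.map (fun p => (p.2.1, p))).foldl
        (fun d p => d.modify p.1 [] (· ++ [p.2])) PySem.Dict.empty := by
      rw [hG, List.foldl_map]
    rw [hfold, PySem.Dict.getD_foldl_modify_append, PySem.Dict.getD_empty]
    simp only [List.filter_map, List.map_map]
    rw [show ((fun x : Int × (Int × (Int × Int × String)) => x.2) ∘ fun p : Int × (Int × Int × String) => (p.2.1, p)) = id from rfl, List.map_id]
    rfl
  -- B's accepted list is a permutation of acceptAll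
  have haccept : G.values.flatMap (fun entries => acceptGroup none entries)
      = G.keys.flatMap (fun k => (acceptAll PySem.Dict.empty il).filter (fun q => q.2.1 == k)) := by
    rw [PySem.Dict.values_eq_map_keys G hnodup [], List.flatMap_map]
    apply List.flatMap_congr
    intro k _
    rw [hgetD k, acceptAll_filter k il PySem.Dict.empty, PySem.Dict.get?_empty]
  have hcov : ∀ q ∈ acceptAll PySem.Dict.empty il, q.2.1 ∈ G.keys := by
    intro q hq
    rw [hkeys, PySem.Set.mem_ofList]
    exact List.mem_map_of_mem ((acceptAll_sublist il PySem.Dict.empty).mem hq)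
  have hperm : (G.values.flatMap (fun entries => acceptGroup none entries)).Perm
      (acceptAll PySem.Dict.empty il) := by
    rw [haccept]
    exact perm_flatMap_filter G.keys hnodup _ hcov
  have hpw : (acceptAll PySem.Dict.empty il).Pairwise (fun a b => a.1 < b.1) :=
    (PySem.List.pairwise_lt_enumerate messages 0).sublist (acceptAll_sublist il PySem.Dict.empty)
  have hsorted : PySem.List.sorted (G.values.flatMap (fun entries => acceptGroup none entries))
      (fun t => t.1) false = acceptAll PySem.Dict.empty il :=
    PySem.List.sorted_eq_of_perm_of_pairwise_lt _ _ _ hperm.symm hpw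
  rw [hA]
  show _ = message_ordering_alt messages
  unfold message_ordering_alt
  rw [← hil, ← hG]
  show List.map (fun x => x.2) (acceptAll PySem.Dict.empty il) =
    List.map (fun t => t.2)
      (PySem.List.sorted (List.flatMap (fun entries => acceptGroup none entries) G.values) (fun t => t.1))
  rw [hsorted]
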